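-- pv_equiv track=rewrite | github.com/Jungle-Algorithm-Study/study | Week07/youngcheon/방금 그곡.py | solution
-- ===== SOURCE A (Python) =====
-- def change_note(note):
--     note = note.replace('C#','c')
--     note = note.replace('D#','d')
--     note = note.replace('F#','f')
--     note = note.replace('G#','g')
--     note = note.replace('A#','a')
--     return note
--
-- def solution(m, musicinfos):
--     m = change_note(m)
--     answer = []
--     for i in musicinfos:
--         info = list(i.split(','))
--         sm,ss = map(int,info[0].split(':'))
--         em,es = map(int,info[1].split(':'))
--
--         if sm <= em and ss <= es:
--             time = (em-sm)*60+(es-ss)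
--         else:
--             # 예를들면 11:59 부터 12:01 까지라면 60에 59를 빼서 1을 더하는 식으로
--             time = (em-sm)*60-ss+es
--
--         title = info[2]
--         note = change_note(info[3])
--
--         if len(note) < time:
--             # 계산 귀찮아서 걍 1000배 하고 자름.. 효율성은 똥망임
--             note = (note*1000)[:time]
--         else:
--             note = note[:time]
--
--         if m in note:
--             answer.append([title, note])
--
--     if answer:
--         # 음계 길이만큼 소트하고 거꾸로 뒤집음 (긴 것 먼저 나오게)
--         answer.sort(key = lambda x: len(x[1]), reverse = True)
--         return answer[0][0]
--     else:
--         return "(None)"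
-- ===== SOURCE B (Python) =====
-- def change_note(note):
--     note = note.replace('C#', 'c')
--     note = note.replace('D#', 'd')
--     note = note.replace('F#', 'f')
--     note = note.replace('G#', 'g')
--     note = note.replace('A#', 'a')
--     return note
--
--
-- def _entry(key, info):
--     """(played length, title) if this entry's played melody contains key, else None."""
--     fields = info.split(',')
--
--     def secs(t):
--         mm, ss = t.split(':')
--         return int(mm) * 60 + int(ss)
--
--     time = secs(fields[1]) - secs(fields[0])
--     note = change_note(fields[3])
--     played = (note * 1000 if len(note) < time else note)[:time]
--     return (len(played), fields[2]) if key in played else None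
--
--
-- def solution(m, musicinfos):
--     key = change_note(m)
--     best = None
--     # scan back-to-front keeping the best of the suffix; '<=' lets an earlier
--     # entry overwrite an equally long later one (first-longest wins)
--     for info in reversed(musicinfos):
--         e = _entry(key, info)
--         if e is not None and (best is None or best[0] <= e[0]):
--             best = e
--     return "(None)" if best is None else best[1]
-- ===== Notes on version B (the rewrite author's own statement) =====
-- stated objective: alternative
-- what changed: The per-entry parsing/note-building is factored into a helper that returns (played length, title) with a direct total-seconds time formula, and A's collect-all-matches list plus stable reverse sort is replaced by a back-to-front scan keeping the best entry of the suffix ('<=' lets an earlier equally-long entry win, matching the stable sort).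
import Mathlib
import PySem

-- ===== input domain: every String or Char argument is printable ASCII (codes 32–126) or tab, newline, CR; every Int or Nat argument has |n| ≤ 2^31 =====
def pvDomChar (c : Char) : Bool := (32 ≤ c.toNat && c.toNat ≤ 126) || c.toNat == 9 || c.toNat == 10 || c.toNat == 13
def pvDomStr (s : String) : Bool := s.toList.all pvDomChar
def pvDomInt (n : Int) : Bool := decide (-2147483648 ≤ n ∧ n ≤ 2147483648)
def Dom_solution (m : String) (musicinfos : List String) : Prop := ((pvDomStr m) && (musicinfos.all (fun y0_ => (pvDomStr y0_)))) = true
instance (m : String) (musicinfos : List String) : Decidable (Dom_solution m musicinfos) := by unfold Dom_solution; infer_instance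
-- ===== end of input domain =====

-- B replaces A's collect-matches-then-stable-reverse-sort by a back-to-front scan that keeps the
-- best (longest-match, earliest on ties) entry of the suffix, with per-entry work factored into a
-- helper using a direct total-seconds time formula; objective: alternative (no sort, no match list).


-- ===== PORT A =====
-- change_note: the five sharp→lowercase replacements, in order (same Python helper in A and B)
def changeNote (s : List Char) : List Char :=
  PySem.Chars.replace
    (PySem.Chars.replace
      (PySem.Chars.replace
        (PySem.Chars.replace
          (PySem.Chars.replace s "C#".toList "c".toList)
          "D#".toList "d".toList)
        "F#".toList "f".toList)
      "G#".toList "g".toList)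
    "A#".toList "a".toList

-- sm,ss = map(int, s.split(':')); the (0,0) defaults are only reached outside Pre_solution,
-- where Python raises ValueError
def parsePair (s : String) : Int × Int :=
  match (PySem.Str.split? s ":").getD [] with
  | [a, b] => ((PySem.Int.ofStr? a).getD 0, (PySem.Int.ofStr? b).getD 0)
  | _ => (0, 0)

def solution (m : String) (musicinfos : List String) : String :=
  let mL := changeNote m.toList
  let answer := musicinfos.foldl (fun answer i =>
    let info := (PySem.Str.split? i ",").getD []
    let p0 := parsePair (info.getD 0 "")
    let p1 := parsePair (info.getD 1 "")
    let time := if p0.1 ≤ p1.1 ∧ p0.2 ≤ p1.2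
      then (p1.1 - p0.1) * 60 + (p1.2 - p0.2)
      else (p1.1 - p0.1) * 60 - p0.2 + p1.2
    let title := info.getD 2 ""
    let note := changeNote (info.getD 3 "").toList
    let note := if (note.length : Int) < time
      then PySem.List.slice ((List.replicate 1000 note).flatten) none (some time)
      else PySem.List.slice note none (some time)
    if PySem.Chars.isIn mL note then answer ++ [(title, note)] else answer) []
  match PySem.List.sorted answer (fun x => (x.2.length : Int)) true with
  | (t, _) :: _ => t
  | [] => "(None)"

-- ===== PORT B =====
-- secs(t): int(mm)*60 + int(ss); the default arms are only reached outside Pre_solution,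
-- where Python raises ValueError
def secsOf (t : String) : Int :=
  match (PySem.Str.split? t ":").getD [] with
  | [mm, ss] => (PySem.Int.ofStr? mm).getD 0 * 60 + (PySem.Int.ofStr? ss).getD 0
  | _ => 0

-- _entry(key, info): (played length, title) if the played melody contains key, else None
def entryB (key : List Char) (info : String) : Option (Int × String) :=
  let fields := (PySem.Str.split? info ",").getD []
  let time := secsOf (fields.getD 1 "") - secsOf (fields.getD 0 "")
  let note := changeNote (fields.getD 3 "").toList
  let played := PySem.List.slice
    (if (note.length : Int) < time then (List.replicate 1000 note).flatten else note)
    none (some time)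
  if PySem.Chars.isIn key played then some ((played.length : Int), fields.getD 2 "") else none

def solution_alt (m : String) (musicinfos : List String) : String :=
  let key := changeNote m.toList
  let best := musicinfos.reverse.foldl (fun (best : Option (Int × String)) info =>
    match entryB key info with
    | none => best
    | some e =>
      match best with
      | none => some e
      | some b => if b.1 ≤ e.1 then some e else some b) none
  match best with
  | none => "(None)"
  | some b => b.2

-- ===== PRECONDITION & SPEC =====
-- Pre_ excludes exactly the entries on which the Python A raises: fewer than 4 comma fields
-- (IndexError) or a start/end field that is not two ':'-separated ints (ValueError).
def Pre_solution (m : String) (musicinfos : List String) : Prop :=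
  ∀ i ∈ musicinfos,
    4 ≤ ((PySem.Str.split? i ",").getD []).length ∧
    (∀ j ∈ [0, 1],
      ((PySem.Str.split? (((PySem.Str.split? i ",").getD []).getD j "") ":").getD []).length = 2 ∧
      (∀ c ∈ (PySem.Str.split? (((PySem.Str.split? i ",").getD []).getD j "") ":").getD [],
        (PySem.Int.ofStr? c).isSome))
instance (m : String) (musicinfos : List String) : Decidable (Pre_solution m musicinfos) := by
  unfold Pre_solution; infer_instance

def pvWitness_solution : String × List String := ("ABC", ["10:00,10:10,WORLD,ABCDEFG"])

def Spec_solution (m : String) (musicinfos : List String) (out : String) : Prop := out = solution_alt m musicinfos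
instance (m : String) (musicinfos : List String) (out : String) : Decidable (Spec_solution m musicinfos out) := by unfold Spec_solution; infer_instance

-- ===== CLAIM (what is proved, stated in full; the proofs are below) =====
def Claim_equal_solution : Prop := ∀ (m : String) (musicinfos : List String), Dom_solution m musicinfos → Pre_solution m musicinfos → Spec_solution m musicinfos (solution m musicinfos)

-- ===== LEMMAS AND PROOFS =====

-- the per-entry computation of A's loop: `some (title, trimmed note)` iff m is in the note
def entryOf (mL : List Char) (i : String) : Option (String × List Char) :=
  let info := (PySem.Str.split? i ",").getD []
  let p0 := parsePair (info.getD 0 "")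
  let p1 := parsePair (info.getD 1 "")
  let time := (p1.1 - p0.1) * 60 + (p1.2 - p0.2)
  let note := changeNote (info.getD 3 "").toList
  let note := if (note.length : Int) < time
    then PySem.List.slice ((List.replicate 1000 note).flatten) none (some time)
    else PySem.List.slice note none (some time)
  if PySem.Chars.isIn mL note then some (info.getD 2 "", note) else none

-- the projection relating A's entries (title, note) to B's entries (length, title)
def gLen (p : String × List Char) : Int × String := ((p.2.length : Int), p.1)

-- first element with maximal note length (ties → the earlier one)
def fm (l : List (String × List Char)) : Option (String × List Char) :=
  match l with
  | [] => none
  | p :: t =>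
    match fm t with
    | none => some p
    | some q => if (p.2.length : Int) < (q.2.length : Int) then some q else some p

-- left-biased strict max on optional entries
def hcomb (h q : Option (String × List Char)) : Option (String × List Char) :=
  match h, q with
  | none, q => q
  | some y, none => some y
  | some y, some p => if (y.2.length : Int) < (p.2.length : Int) then some p else some y

theorem hcomb_assoc (a b c : Option (String × List Char)) :
    hcomb (hcomb a b) c = hcomb a (hcomb b c) := by
  cases a <;> cases b <;> cases c <;> simp only [hcomb] <;> split_ifs <;>
    first | rfl | (simp only [hcomb] <;> split_ifs <;> first | rfl | omega)

theorem fm_cons (p : String × List Char) (t : List (String × List Char)) :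
    fm (p :: t) = hcomb (some p) (fm t) := by
  cases h : fm t <;> simp [fm, hcomb, h]

theorem insertBy_head? (x : String × List Char) (s : List (String × List Char)) :
    (PySem.List.insertBy
      (fun a b => decide ((b.2.length : Int) < (a.2.length : Int))) x s).head? =
    hcomb s.head? (some x) := by
  cases s with
  | nil => simp [PySem.List.insertBy, hcomb]
  | cons y ys =>
    simp only [PySem.List.insertBy, hcomb, List.head?_cons]
    split_ifs with h1 h2 <;> simp_all

theorem foldl_insertBy_head? (l : List (String × List Char))
    (s : List (String × List Char)) :
    (l.foldl (fun acc x =>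
        PySem.List.insertBy
          (fun a b => decide ((b.2.length : Int) < (a.2.length : Int))) x acc) s).head? =
    hcomb s.head? (fm l) := by
  induction l generalizing s with
  | nil => cases s <;> simp [fm, hcomb]
  | cons p t ih =>
    simp only [List.foldl_cons, ih, insertBy_head?, fm_cons, hcomb_assoc]

theorem sorted_head?_eq_fm (l : List (String × List Char)) :
    (PySem.List.sorted l (fun x => (x.2.length : Int)) true).head? = fm l := by
  rw [PySem.List.sorted_rev_eq_foldl_insertBy]
  have := foldl_insertBy_head? l []
  simp only [List.head?_nil] at this
  rw [this]
  cases fm l <;> rfl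

-- A's loop, seen through entryOf: it collects the filterMap of the entries
theorem bodyA_eq (mL : List Char) :
    (fun (answer : List (String × List Char)) (i : String) =>
      let info := (PySem.Str.split? i ",").getD []
      let p0 := parsePair (info.getD 0 "")
      let p1 := parsePair (info.getD 1 "")
      let time := if p0.1 ≤ p1.1 ∧ p0.2 ≤ p1.2
        then (p1.1 - p0.1) * 60 + (p1.2 - p0.2)
        else (p1.1 - p0.1) * 60 - p0.2 + p1.2
      let title := info.getD 2 ""
      let note := changeNote (info.getD 3 "").toList
      let note := if (note.length : Int) < time
        then PySem.List.slice ((List.replicate 1000 note).flatten) none (some time)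
        else PySem.List.slice note none (some time)
      if PySem.Chars.isIn mL note then answer ++ [(title, note)] else answer) =
    (fun answer i => match entryOf mL i with
      | none => answer
      | some e => answer ++ [e]) := by
  funext answer i
  have htime : ∀ a b c d : Int,
      (if a ≤ c ∧ b ≤ d then (c - a) * 60 + (d - b) else (c - a) * 60 - b + d) =
      (c - a) * 60 + (d - b) := by
    intro a b c d; split_ifs <;> ring
  simp only [entryOf, htime]
  split_ifs <;> rfl

theorem foldA_filterMap (mL : List Char) (l : List String) (st : List (String × List Char)) :
    l.foldl (fun acc x => match entryOf mL x with
      | none => acc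
      | some e => acc ++ [e]) st = st ++ l.filterMap (entryOf mL) := by
  induction l generalizing st with
  | nil => simp
  | cons i t ih =>
    simp only [List.foldl_cons, List.filterMap_cons]
    cases entryOf mL i <;> simp [ih]

-- secsOf computes the total seconds of the pair parsePair extracts
theorem secsOf_eq (s : String) :
    secsOf s = (parsePair s).1 * 60 + (parsePair s).2 := by
  unfold secsOf parsePair
  rcases (PySem.Str.split? s ":").getD [] with _ | ⟨a, _ | ⟨b, _ | ⟨c, t⟩⟩⟩ <;> simp

-- B's per-entry helper is A's per-entry result, projected to (length, title)
theorem entry_core (key note : List Char) (T : Int) (title : String) :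
    (if PySem.Chars.isIn key
        (PySem.List.slice
          (if (note.length : Int) < T then (List.replicate 1000 note).flatten else note)
          none (some T))
      then some (((PySem.List.slice
          (if (note.length : Int) < T then (List.replicate 1000 note).flatten else note)
          none (some T)).length : Int), title)
      else none) =
    Option.map gLen
      (if PySem.Chars.isIn key
          (if (note.length : Int) < T
            then PySem.List.slice ((List.replicate 1000 note).flatten) none (some T)
            else PySem.List.slice note none (some T))
        then some (title,
          if (note.length : Int) < T
            then PySem.List.slice ((List.replicate 1000 note).flatten) none (some T)
            else PySem.List.slice note none (some T))
        else none) := by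
  by_cases hc : (note.length : Int) < T
  · simp only [if_pos hc]
    split_ifs with h <;> simp only [Option.map_some, Option.map_none, gLen]
  · simp only [if_neg hc]
    split_ifs with h <;> simp only [Option.map_some, Option.map_none, gLen]

theorem entryB_eq (key : List Char) (i : String) :
    entryB key i = (entryOf key i).map gLen := by
  simp only [entryB, entryOf, secsOf_eq]
  have htime :
      (parsePair (((PySem.Str.split? i ",").getD []).getD 1 "")).1 * 60 +
        (parsePair (((PySem.Str.split? i ",").getD []).getD 1 "")).2 -
      ((parsePair (((PySem.Str.split? i ",").getD []).getD 0 "")).1 * 60 +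
        (parsePair (((PySem.Str.split? i ",").getD []).getD 0 "")).2) =
      ((parsePair (((PySem.Str.split? i ",").getD []).getD 1 "")).1 -
        (parsePair (((PySem.Str.split? i ",").getD []).getD 0 "")).1) * 60 +
      ((parsePair (((PySem.Str.split? i ",").getD []).getD 1 "")).2 -
        (parsePair (((PySem.Str.split? i ",").getD []).getD 0 "")).2) := by ring
  rw [htime]
  exact entry_core _ _ _ _

-- B's back-to-front scan is the right fold computing fm of the filterMap, projected
theorem foldr_best (key : List Char) (l : List String) :
    l.foldr (fun info best =>
      match entryB key info with
      | none => best
      | some e =>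
        match best with
        | none => some e
        | some b => if b.1 ≤ e.1 then some e else some b) none =
    (fm (l.filterMap (entryOf key))).map gLen := by
  induction l with
  | nil => rfl
  | cons i t ih =>
    rw [List.foldr_cons, ih, List.filterMap_cons, entryB_eq]
    cases h : entryOf key i with
    | none => simp
    | some p =>
      rw [fm_cons]
      cases hq : fm (t.filterMap (entryOf key)) with
      | none => simp [hcomb]
      | some q =>
        simp only [Option.map_some, hcomb]
        rw [apply_ite (Option.map gLen)]
        simp only [Option.map_some, gLen]
        split_ifs <;> first | rfl | (exfalso; omega)

-- ===== VERDICT (by name: the statement is the Claim_ definition above) =====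
theorem solution_spec : Claim_equal_solution := by
  intro m musicinfos _ _
  unfold Spec_solution
  simp only [solution, solution_alt]
  rw [List.foldl_ext _ _ _
        (fun acc x _ => congrFun (congrFun (bodyA_eq (changeNote m.toList)) acc) x),
      foldA_filterMap, List.foldl_reverse]
  simp only [List.nil_append]
  rw [foldr_best]
  have hhd := sorted_head?_eq_fm (musicinfos.filterMap (entryOf (changeNote m.toList)))
  cases hfm : fm (musicinfos.filterMap (entryOf (changeNote m.toList))) with
  | none =>
    rw [hfm] at hhd
    cases hs : PySem.List.sorted (musicinfos.filterMap (entryOf (changeNote m.toList)))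
        (fun x => (x.2.length : Int)) true with
    | nil => rfl
    | cons a b => rw [hs] at hhd; simp at hhd
  | some p =>
    rw [hfm] at hhd
    cases hs : PySem.List.sorted (musicinfos.filterMap (entryOf (changeNote m.toList)))
        (fun x => (x.2.length : Int)) true with
    | nil => rw [hs] at hhd; simp at hhd
    | cons a b =>
      rw [hs] at hhd
      simp only [List.head?_cons, Option.some.injEq] at hhd
      subst hhd
      simp [gLen]
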